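-- pv_equiv track=rewrite | github.com/ViVi141/Realistic-Stamina-System | tools/compare_constants_meaning.py | compare_constant_meanings
-- ===== SOURCE A (Python) =====
-- from typing import Dict, Tuple, List
--
-- def compare_constant_meanings(c_meanings: Dict[str, Dict], python_meanings: Dict[str, Dict]) -> Tuple[Dict, Dict, Dict]:
--     """
--     对比C和Python文件中常量的含义
--
--     Args:
--         c_meanings: C文件中的常量含义
--         python_meanings: Python文件中的常量含义
--
--     Returns:
--         (匹配的常量含义, C有Python无的常量含义, Python有C无的常量含义)
--     """
--     matched = {}
--     c_only = {}
--     python_only = {}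
--
--     # 检查C文件中的常量
--     for name, meaning in c_meanings.items():
--         if name in python_meanings:
--             matched[name] = (meaning, python_meanings[name])
--         else:
--             c_only[name] = meaning
--
--     # 检查Python文件中独有的常量
--     for name, meaning in python_meanings.items():
--         if name not in c_meanings:
--             python_only[name] = meaning
--
--     return matched, c_only, python_only
-- ===== SOURCE B (Python) =====
-- def compare_constant_meanings(c_meanings, python_meanings):
--     # One pass: python_only starts as a copy of python_meanings and shrinks;
--     # each match is popped out of it, so no second loop over python_meanings is needed.
--     matched = {}
--     c_only = {}
--     python_only = dict(python_meanings)
--     for name, meaning in c_meanings.items():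
--         if name in python_only:
--             matched[name] = (meaning, python_only.pop(name))
--         else:
--             c_only[name] = meaning
--     return matched, c_only, python_only
-- ===== Notes on version B (the rewrite author's own statement) =====
-- stated objective: alternative
-- what changed: A's second loop over python_meanings is eliminated: B makes a single pass over c_meanings while maintaining python_only as a mutable copy of python_meanings from which each matched key is popped, so python_only is computed by destructive deletion instead of a membership-scan pass. Pre_ only requires distinct keys in each association list, which is automatic for arguments that represent Python dicts.
import Mathlib
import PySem

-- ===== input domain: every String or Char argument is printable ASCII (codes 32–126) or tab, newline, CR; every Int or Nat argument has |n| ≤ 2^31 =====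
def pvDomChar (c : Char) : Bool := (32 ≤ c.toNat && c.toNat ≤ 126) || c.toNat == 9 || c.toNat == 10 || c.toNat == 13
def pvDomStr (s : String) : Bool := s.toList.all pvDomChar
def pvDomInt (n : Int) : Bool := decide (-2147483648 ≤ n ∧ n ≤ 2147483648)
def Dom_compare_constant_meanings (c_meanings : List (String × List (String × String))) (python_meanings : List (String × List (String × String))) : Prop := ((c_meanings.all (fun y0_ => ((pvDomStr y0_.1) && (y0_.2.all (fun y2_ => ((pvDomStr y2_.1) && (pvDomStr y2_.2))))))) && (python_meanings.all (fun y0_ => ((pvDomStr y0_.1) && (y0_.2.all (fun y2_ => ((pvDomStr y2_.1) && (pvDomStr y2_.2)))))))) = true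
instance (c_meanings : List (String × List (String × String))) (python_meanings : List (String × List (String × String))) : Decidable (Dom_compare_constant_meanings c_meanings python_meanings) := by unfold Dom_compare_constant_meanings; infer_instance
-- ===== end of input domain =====

-- B makes one pass over c_meanings, popping each matched key out of a mutable copy of python_meanings,
-- so A's second membership-scan loop disappears; same cost class, no speed claim.

-- ===== PORT A =====
-- A: one loop over c_meanings building matched/c_only together, then a second loop over python_meanings
-- skipping keys present in c_meanings.
def compare_constant_meanings (c_meanings : List (String × List (String × String))) (python_meanings : List (String × List (String × String))) : (List (String × (List (String × String)) × (List (String × String)))) × (List (String × List (String × String))) × (List (String × List (String × String))) :=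
  let pyD : PySem.Dict String (List (String × String)) := PySem.Dict.mk python_meanings
  let cD : PySem.Dict String (List (String × String)) := PySem.Dict.mk c_meanings
  -- for name, meaning in c_meanings.items(): if name in python_meanings: matched[name] = (meaning, python_meanings[name]) else: c_only[name] = meaning
  let mc := c_meanings.foldl
    (fun (acc : PySem.Dict String ((List (String × String)) × (List (String × String))) × PySem.Dict String (List (String × String))) p =>
      if pyD.contains p.1 then
        (acc.1.insert p.1 (p.2, (pyD.get? p.1).getD []), acc.2)
      else
        (acc.1, acc.2.insert p.1 p.2))
    (PySem.Dict.empty, PySem.Dict.empty)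
  -- for name, meaning in python_meanings.items(): if name not in c_meanings: python_only[name] = meaning
  let python_only := python_meanings.foldl
    (fun (acc : PySem.Dict String (List (String × String))) p =>
      if cD.contains p.1 then acc else acc.insert p.1 p.2)
    PySem.Dict.empty
  (mc.1.items, mc.2.items, python_only.items)

-- ===== PORT B =====
-- B: python_only starts as a copy of python_meanings; ONE loop over c_meanings pops each matched key out of it
-- (pop = lookup + erase) while filling matched/c_only; no loop over python_meanings.
def compare_constant_meanings_alt (c_meanings : List (String × List (String × String))) (python_meanings : List (String × List (String × String))) : (List (String × (List (String × String)) × (List (String × String)))) × (List (String × List (String × String))) × (List (String × List (String × String))) :=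
  let r := c_meanings.foldl
    (fun (acc : PySem.Dict String ((List (String × String)) × (List (String × String))) × PySem.Dict String (List (String × String)) × PySem.Dict String (List (String × String))) p =>
      if acc.2.2.contains p.1 then
        (acc.1.insert p.1 (p.2, (acc.2.2.get? p.1).getD []), acc.2.1, acc.2.2.erase p.1)
      else
        (acc.1, acc.2.1.insert p.1 p.2, acc.2.2))
    (PySem.Dict.empty, PySem.Dict.empty, PySem.Dict.mk python_meanings)
  (r.1.items, r.2.1.items, r.2.2.items)

-- ===== PRECONDITION & SPEC =====
-- Pre_ requires the keys of each association list to be distinct: the Python arguments are dicts, and a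
-- duplicate-key list represents no Python dict (it excludes nothing A's Python caller could ever pass).
def Pre_compare_constant_meanings (c_meanings : List (String × List (String × String))) (python_meanings : List (String × List (String × String))) : Prop :=
  (c_meanings.map Prod.fst).Nodup ∧ (python_meanings.map Prod.fst).Nodup
instance (c_meanings : List (String × List (String × String))) (python_meanings : List (String × List (String × String))) : Decidable (Pre_compare_constant_meanings c_meanings python_meanings) := by unfold Pre_compare_constant_meanings; infer_instance

def pvWitness_compare_constant_meanings : (List (String × List (String × String))) × (List (String × List (String × String))) :=
  ([("A", [("x", "y")]), ("C", [])], [("A", [("u", "v")]), ("B", [])])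

def Spec_compare_constant_meanings (c_meanings : List (String × List (String × String))) (python_meanings : List (String × List (String × String))) (out : (List (String × (List (String × String)) × (List (String × String)))) × (List (String × List (String × String))) × (List (String × List (String × String)))) : Prop := out = compare_constant_meanings_alt c_meanings python_meanings
instance (c_meanings : List (String × List (String × String))) (python_meanings : List (String × List (String × String))) (out : (List (String × (List (String × String)) × (List (String × String)))) × (List (String × List (String × String))) × (List (String × List (String × String)))) : Decidable (Spec_compare_constant_meanings c_meanings python_meanings out) := by unfold Spec_compare_constant_meanings; exact @instDecidableEqProd _ _ inferInstance inferInstance _ _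

-- ===== CLAIM (what is proved, stated in full; the proofs are below) =====
def Claim_equal_compare_constant_meanings : Prop := ∀ (c_meanings : List (String × List (String × String))) (python_meanings : List (String × List (String × String))), Dom_compare_constant_meanings c_meanings python_meanings → Pre_compare_constant_meanings c_meanings python_meanings → Spec_compare_constant_meanings c_meanings python_meanings (compare_constant_meanings c_meanings python_meanings)

-- ===== LEMMAS AND PROOFS =====

-- erasing a different key does not change a lookup
theorem pv_get?_erase_of_ne {ν : Type} (d : PySem.Dict String ν) (k k' : String) (h : k' ≠ k) :
    (d.erase k).get? k' = d.get? k' := by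
  simp only [PySem.Dict.erase, PySem.Dict.get?, List.find?_filter]
  have hp : (fun (a : String × ν) => decide ((!(a.1 == k)) = true ∧ (a.1 == k') = true))
          = (fun (p : String × ν) => p.1 == k') := by
    funext a
    by_cases hk2 : a.1 = k'
    · simp [hk2, h]
    · simp [hk2]
  rw [hp]

-- A's combined loop over c_meanings is the pair of two filtered folds.
theorem pv_foldl_pair_split (pyD : PySem.Dict String (List (String × String)))
    (l : List (String × List (String × String)))
    (m : PySem.Dict String ((List (String × String)) × (List (String × String))))
    (co : PySem.Dict String (List (String × String))) :
    l.foldl (fun acc p =>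
        if pyD.contains p.1 then
          (acc.1.insert p.1 (p.2, (pyD.get? p.1).getD []), acc.2)
        else
          (acc.1, acc.2.insert p.1 p.2)) (m, co)
      = ((l.filter (fun p => pyD.contains p.1)).foldl
           (fun d p => d.insert p.1 (p.2, (pyD.get? p.1).getD [])) m,
         (l.filter (fun p => !pyD.contains p.1)).foldl (fun d p => d.insert p.1 p.2) co) := by
  induction l generalizing m co with
  | nil => rfl
  | cons a t ih =>
    by_cases h : pyD.contains a.1 = true <;> simp [h, ih]

-- A's python_only loop skips the keys present in c_meanings: it is a filtered fold.
theorem pv_foldl_skip (cD : PySem.Dict String (List (String × String)))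
    (l : List (String × List (String × String)))
    (init : PySem.Dict String (List (String × String))) :
    l.foldl (fun acc p => if cD.contains p.1 then acc else acc.insert p.1 p.2) init
      = (l.filter (fun p => !cD.contains p.1)).foldl (fun d p => d.insert p.1 p.2) init := by
  induction l generalizing init with
  | nil => rfl
  | cons a t ih =>
    by_cases h : cD.contains a.1 = true <;> simp [h, ih]

-- B's single pop-loop, run on a dict that agrees with pyD on the (distinct) keys of l, splits into A's
-- two filtered matched/c_only folds plus the residue of rem: rem minus the matched keys of l.
theorem pv_foldB_split (pyD : PySem.Dict String (List (String × String)))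
    (l : List (String × List (String × String)))
    (m : PySem.Dict String ((List (String × String)) × (List (String × String))))
    (co rem : PySem.Dict String (List (String × String)))
    (hnd : (l.map Prod.fst).Nodup)
    (hag : ∀ k ∈ l.map Prod.fst, rem.get? k = pyD.get? k) :
    l.foldl (fun acc p =>
        if acc.2.2.contains p.1 then
          (acc.1.insert p.1 (p.2, (acc.2.2.get? p.1).getD []), acc.2.1, acc.2.2.erase p.1)
        else
          (acc.1, acc.2.1.insert p.1 p.2, acc.2.2)) (m, co, rem)
      = ((l.filter (fun p => pyD.contains p.1)).foldl
           (fun d p => d.insert p.1 (p.2, (pyD.get? p.1).getD [])) m,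
         (l.filter (fun p => !pyD.contains p.1)).foldl (fun d p => d.insert p.1 p.2) co,
         PySem.Dict.mk (rem.items.filter
           (fun q => !(l.any (fun p => pyD.contains p.1 && (q.1 == p.1)))))) := by
  induction l generalizing m co rem with
  | nil => simp
  | cons a t ih =>
    have hga : rem.get? a.1 = pyD.get? a.1 := hag a.1 (by simp)
    have hca : rem.contains a.1 = pyD.contains a.1 := by
      rw [PySem.Dict.contains_eq_isSome_get?, PySem.Dict.contains_eq_isSome_get?, hga]
    have hnd' : (t.map Prod.fst).Nodup := (List.nodup_cons.mp (by simpa using hnd)).2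
    have hamem : a.1 ∉ t.map Prod.fst := (List.nodup_cons.mp (by simpa using hnd)).1
    by_cases h : pyD.contains a.1 = true
    · have hag' : ∀ k ∈ t.map Prod.fst, (rem.erase a.1).get? k = pyD.get? k := by
        intro k hk
        rw [pv_get?_erase_of_ne _ _ _ (by rintro rfl; exact hamem hk)]
        exact hag k (List.mem_cons_of_mem _ hk)
      have h3 : ((rem.erase a.1).items.filter (fun q => !(t.any (fun p => pyD.contains p.1 && (q.1 == p.1)))))
              = rem.items.filter (fun q => !((a :: t).any (fun p => pyD.contains p.1 && (q.1 == p.1)))) := by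
        show ((rem.items.filter _).filter _) = _
        rw [List.filter_filter]
        apply List.filter_congr
        intro q _
        simp only [List.any_cons, h, Bool.true_and, Bool.not_or]
        cases hq : (q.1 == a.1) <;> simp
      simp only [List.foldl_cons, hca, h, if_true, hga]
      rw [ih _ _ _ hnd' hag']
      simp [h, h3]
    · have hag' : ∀ k ∈ t.map Prod.fst, rem.get? k = pyD.get? k :=
        fun k hk => hag k (List.mem_cons_of_mem _ hk)
      have h3 : (rem.items.filter (fun q => !(t.any (fun p => pyD.contains p.1 && (q.1 == p.1)))))
              = rem.items.filter (fun q => !((a :: t).any (fun p => pyD.contains p.1 && (q.1 == p.1)))) := by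
        apply List.filter_congr
        intro q _
        simp [h]
      simp only [List.foldl_cons, hca]
      rw [if_neg (by simp [h])]
      rw [ih _ _ _ hnd' hag']
      simp [h, h3]

-- A's filtered python_only fold over py (distinct keys) lists exactly the py entries whose key is matched
-- by no c entry — which is B's residue filter.
theorem pv_items_third (c py : List (String × List (String × String)))
    (hndpy : (py.map Prod.fst).Nodup) :
    ((py.filter (fun p => !(PySem.Dict.mk c).contains p.1)).foldl
        (fun d p => d.insert p.1 p.2) (PySem.Dict.empty : PySem.Dict String (List (String × String)))).items
      = (PySem.Dict.mk py).items.filter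
          (fun q => !(c.any (fun p => (PySem.Dict.mk py).contains p.1 && (q.1 == p.1)))) := by
  have hfresh := PySem.Dict.items_foldl_insert_fresh
      (l := py.filter (fun p => !(PySem.Dict.mk c).contains p.1))
      (k := fun (a : String × List (String × String)) => a.1) (v := fun a => a.2)
      (d := (PySem.Dict.empty : PySem.Dict String (List (String × String))))
      (by intro a _; exact PySem.Dict.contains_empty _)
      (hndpy.sublist (List.filter_sublist.map Prod.fst))
  rw [hfresh]
  have hmap : (py.filter (fun p => !(PySem.Dict.mk c).contains p.1)).map (fun a => (a.1, a.2))
       = py.filter (fun p => !(PySem.Dict.mk c).contains p.1) := by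
    simp
  rw [hmap]
  rw [show (PySem.Dict.empty : PySem.Dict String (List (String × String))).items = [] from rfl,
      List.nil_append]
  apply List.filter_congr
  intro q hq
  congr 1
  rw [Bool.eq_iff_iff]
  simp only [PySem.Dict.contains, List.any_eq_true, Bool.and_eq_true, beq_iff_eq]
  constructor
  · rintro ⟨p, hp, hpq⟩
    exact ⟨p, hp, ⟨q, hq, hpq.symm⟩, hpq.symm⟩
  · rintro ⟨p, hp, _, hpq⟩
    exact ⟨p, hp, hpq.symm⟩

-- ===== VERDICT (by name: the statement is the Claim_ definition above) =====
theorem compare_constant_meanings_spec : Claim_equal_compare_constant_meanings := by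
  intro c py _ hpre
  obtain ⟨hndc, hndpy⟩ := hpre
  unfold Spec_compare_constant_meanings
  dsimp only [compare_constant_meanings, compare_constant_meanings_alt]
  rw [pv_foldl_pair_split (PySem.Dict.mk py) c, pv_foldl_skip (PySem.Dict.mk c) py,
      pv_foldB_split (PySem.Dict.mk py) c _ _ _ hndc (fun _ _ => rfl)]
  refine Prod.ext rfl (Prod.ext rfl ?_)
  -- third component: A's skip-loop over py equals B's residue of the popped copy of py
  show (List.foldl _ PySem.Dict.empty _).items = _
  rw [pv_items_third c py hndpy]
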